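-- pv_equiv track=rewrite | github.com/devirusgg/Problem-Solving | Prgrms_lv2_131127.py | solution
-- ===== SOURCE A (Python) =====
-- def solution(want, number, discount):
--     wantCnt = sum(number)
--     wantDict = dict(zip(want, number))
--     answer = 0
--     n = len(discount) - wantCnt
--     for i in range(n + 1):
--         discountDict = dict()
--         for j in range(i, i + wantCnt):
--             if discount[j] in discountDict.keys():
--                 discountDict[discount[j]] += 1
--             else:
--                 discountDict[discount[j]] = 1
--         if discountDict == wantDict:
--             answer += 1
--     return answer
-- ===== SOURCE B (Python) =====
-- def solution(want, number, discount):
--     k = sum(number)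
--     target = dict(zip(want, number))
--     n = len(discount) - k
--     if n < 0:
--         return 0
--     cnt = {}
--     mismatch = len(target)
--
--     def shift(x, d):
--         nonlocal mismatch
--         t = target.get(x, 0)
--         before = cnt.get(x, 0)
--         if before == t:
--             mismatch += 1
--         after = before + d
--         cnt[x] = after
--         if after == t:
--             mismatch -= 1
--
--     for j in range(k):
--         shift(discount[j], 1)
--     ans = 1 if mismatch == 0 else 0
--     for i in range(1, n + 1):
--         shift(discount[i - 1], -1)
--         shift(discount[i + k - 1], 1)
--         if mismatch == 0:
--             ans += 1
--     return ans
-- ===== Notes on version B (the rewrite author's own statement) =====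
-- stated objective: faster
-- what changed: Replaces A's per-window dict rebuild and full dict comparison with one sliding-window pass maintaining an incremental count dict and a mismatch counter; Pre_ excludes inputs with negative sum(number) (outside the natural domain of item counts), where A's empty-window loop happens to return a value while B raises IndexError.
-- outside the precondition, e.g. on solution(['a'], [-1], ['x']): A returns 0, B raises IndexError
import Mathlib
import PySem

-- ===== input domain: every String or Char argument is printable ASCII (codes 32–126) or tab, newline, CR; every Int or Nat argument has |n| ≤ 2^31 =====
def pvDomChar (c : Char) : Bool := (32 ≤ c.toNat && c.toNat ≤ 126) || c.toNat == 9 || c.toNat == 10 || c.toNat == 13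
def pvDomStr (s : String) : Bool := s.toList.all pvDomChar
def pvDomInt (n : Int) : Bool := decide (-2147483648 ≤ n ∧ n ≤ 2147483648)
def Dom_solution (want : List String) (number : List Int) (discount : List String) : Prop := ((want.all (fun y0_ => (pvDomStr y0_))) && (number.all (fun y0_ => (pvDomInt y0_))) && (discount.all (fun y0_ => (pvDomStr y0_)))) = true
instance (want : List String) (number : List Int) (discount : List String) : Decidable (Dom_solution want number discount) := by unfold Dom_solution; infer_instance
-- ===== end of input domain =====

-- B replaces A's per-window dict rebuild and full dict comparison with a single sliding-window
-- pass that maintains one incremental count dict and a mismatch counter (an alternative algorithm).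

-- ===== PORT A =====
-- Python's dict == ignores insertion order: equal key sets and equal values
def pyDictEq (d e : PySem.Dict String Int) : Bool :=
  d.items.all (fun p => e.get? p.1 == some p.2) && e.items.all (fun p => d.get? p.1 == some p.2)

def solution (want : List String) (number : List Int) (discount : List String) : Int :=
  let wantCnt := number.sum
  let wantDict := PySem.Dict.ofList (want.zip number)
  let n := PySem.List.len discount - wantCnt
  (PySem.List.pyRange 0 (n + 1) 1).foldl (fun answer i =>
    let discountDict := (PySem.List.pyRange i (i + wantCnt) 1).foldl
      (fun d j =>
        let x := PySem.List.pyGetD discount j ""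
        if d.contains x then d.insert x (d.getD x 0 + 1) else d.insert x 1)
      PySem.Dict.empty
    if pyDictEq discountDict wantDict then answer + 1 else answer) 0

-- ===== PORT B =====
def shiftB (target : PySem.Dict String Int) (st : PySem.Dict String Int × Int) (x : String) (d : Int) :
    PySem.Dict String Int × Int :=
  let t := target.getD x 0
  let before := st.1.getD x 0
  let m1 := if before == t then st.2 + 1 else st.2
  let after := before + d
  let cnt := st.1.insert x after
  let m2 := if after == t then m1 - 1 else m1
  (cnt, m2)

def solution_alt (want : List String) (number : List Int) (discount : List String) : Int :=
  let k := number.sum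
  let target := PySem.Dict.ofList (want.zip number)
  let n := PySem.List.len discount - k
  if n < 0 then 0
  else
    let st0 := (PySem.List.pyRange 0 k 1).foldl
      (fun st j => shiftB target st (PySem.List.pyGetD discount j "") 1)
      (PySem.Dict.empty, (target.size : Int))
    let ans : Int := if st0.2 = 0 then 1 else 0
    let res := (PySem.List.pyRange 1 (n + 1) 1).foldl
      (fun p i =>
        let st1 := shiftB target p.1 (PySem.List.pyGetD discount (i - 1) "") (-1)
        let st2 := shiftB target st1 (PySem.List.pyGetD discount (i + k - 1) "") 1
        (st2, if st2.2 = 0 then p.2 + 1 else p.2))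
      (st0, ans)
    res.2

-- ===== PRECONDITION & SPEC =====
-- Pre_ excludes inputs whose requested total count sum(number) is negative: those are outside the
-- task's natural domain of item counts (A's empty-window loop happens to return a value there,
-- while B's sliding window raises IndexError).
def Pre_solution (want : List String) (number : List Int) (discount : List String) : Prop :=
  0 ≤ number.sum
instance (want : List String) (number : List Int) (discount : List String) : Decidable (Pre_solution want number discount) := by unfold Pre_solution; infer_instance

def pvWitness_solution : List String × List Int × List String :=
  (["a"], [1], ["a", "b"])

def Spec_solution (want : List String) (number : List Int) (discount : List String) (out : Int) : Prop := out = solution_alt want number discount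
instance (want : List String) (number : List Int) (discount : List String) (out : Int) : Decidable (Spec_solution want number discount out) := by unfold Spec_solution; infer_instance

-- ===== CLAIM (what is proved, stated in full; the proofs are below) =====
def Claim_equal_solution : Prop := ∀ (want : List String) (number : List Int) (discount : List String), Dom_solution want number discount → Pre_solution want number discount → Spec_solution want number discount (solution want number discount)

-- ===== LEMMAS AND PROOFS =====
def Mcard (target c : PySem.Dict String Int) : Nat :=
  ((c.keys.toFinset ∪ target.keys.toFinset).filter (fun x => c.getD x 0 ≠ target.getD x 0)).card

-- number of zero-valued keys of the target dict (a constant of B's run)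
def Zcard (target : PySem.Dict String Int) : Nat :=
  (target.keys.toFinset.filter (fun x => target.getD x 0 = 0)).card

theorem card_filter_insert_erase (x : String) (S : Finset String) (p : String → Prop) [DecidablePred p] :
    ((insert x S).filter p).card = ((S.erase x).filter p).card + (if p x then 1 else 0) := by
  have h : insert x S = insert x (S.erase x) := by
    ext y; simp [Finset.mem_insert, Finset.mem_erase]; tauto
  rw [h, Finset.filter_insert]
  split_ifs with hp
  · rw [Finset.card_insert_of_notMem (by simp [Finset.mem_filter])]
  · simp

theorem card_filter_eq_erase (x : String) (S : Finset String) (p : String → Prop) [DecidablePred p] :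
    (S.filter p).card = ((S.erase x).filter p).card + (if x ∈ S ∧ p x then 1 else 0) := by
  by_cases hx : x ∈ S
  · conv_lhs => rw [← Finset.insert_erase hx]
    rw [card_filter_insert_erase, Finset.erase_idem]
    simp [hx]
  · rw [Finset.erase_eq_of_notMem hx]
    simp [hx]

theorem keys_toFinset_insert (c : PySem.Dict String Int) (x : String) (v : Int) :
    (c.insert x v).keys.toFinset = insert x c.keys.toFinset := by
  by_cases hc : c.contains x
  · rw [PySem.Dict.keys_insert_of_contains c v hc]
    have hx : x ∈ c.keys := (PySem.Dict.contains_iff_mem_keys c x).1 hc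
    rw [Finset.insert_eq_self.mpr (List.mem_toFinset.2 hx)]
  · rw [PySem.Dict.keys_insert_of_not_contains c v (by simpa using hc)]
    ext y; simp

theorem not_mem_getD_zero (c : PySem.Dict String Int) (x : String) (h : x ∉ c.keys) :
    c.getD x 0 = 0 :=
  PySem.Dict.getD_of_not_contains c 0 (by
    by_contra hb
    exact h ((PySem.Dict.contains_iff_mem_keys c x).1 (by simpa using hb)))

theorem Mcard_insert (target c : PySem.Dict String Int) (x : String) (v : Int) :
    (Mcard target (c.insert x v) : Int)
      = (Mcard target c : Int)
        + (if v = target.getD x 0 then 0 else 1)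
        - (if c.getD x 0 = target.getD x 0 then 0 else 1) := by
  classical
  set A := c.keys.toFinset ∪ target.keys.toFinset with hA
  have hU : (c.insert x v).keys.toFinset ∪ target.keys.toFinset = insert x A := by
    rw [keys_toFinset_insert, Finset.insert_union]
  have hgd : ∀ y, (c.insert x v).getD y 0 = if y = x then v else c.getD y 0 := fun y =>
    PySem.Dict.getD_insert c x y v 0
  have h1 : Mcard target (c.insert x v)
      = ((A.erase x).filter (fun y => c.getD y 0 ≠ target.getD y 0)).card
        + (if v ≠ target.getD x 0 then 1 else 0) := by
    unfold Mcard
    rw [hU, card_filter_insert_erase]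
    congr 1
    · refine congrArg Finset.card (Finset.filter_congr ?_)
      intro y hy
      have hyx : y ≠ x := (Finset.mem_erase.1 hy).1
      simp [hgd y, hyx]
    · simp [hgd x]
  have h2 : Mcard target c
      = ((A.erase x).filter (fun y => c.getD y 0 ≠ target.getD y 0)).card
        + (if c.getD x 0 ≠ target.getD x 0 then 1 else 0) := by
    unfold Mcard
    rw [← hA, card_filter_eq_erase x]
    congr 1
    by_cases hx : x ∈ A
    · simp [hx]
    · have hc0 : c.getD x 0 = 0 := not_mem_getD_zero c x (by
        intro h; exact hx (by rw [hA]; exact Finset.mem_union_left _ (List.mem_toFinset.2 h)))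
      have ht0 : target.getD x 0 = 0 := not_mem_getD_zero target x (by
        intro h; exact hx (by rw [hA]; exact Finset.mem_union_right _ (List.mem_toFinset.2 h)))
      simp [hx, hc0, ht0]
  rw [h1, h2]
  split_ifs <;> push_cast <;> omega

theorem shiftB_spec (target c : PySem.Dict String Int) (mm z : Int) (x : String) (d : Int)
    (hmm : mm = (Mcard target c : Int) + z) :
    shiftB target (c, mm) x d =
      (c.insert x (c.getD x 0 + d),
        (Mcard target (c.insert x (c.getD x 0 + d)) : Int) + z) := by
  unfold shiftB
  simp only [beq_iff_eq]
  have := Mcard_insert target c x (c.getD x 0 + d)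
  refine Prod.ext rfl ?_
  simp only
  rw [hmm]
  split_ifs at this ⊢ <;> omega

theorem Mcard_eq_zero_iff (target c : PySem.Dict String Int) :
    Mcard target c = 0 ↔ ∀ x, c.getD x 0 = target.getD x 0 := by
  unfold Mcard
  rw [Finset.card_eq_zero, Finset.filter_eq_empty_iff]
  constructor
  · intro h x
    by_cases hx : x ∈ c.keys.toFinset ∪ target.keys.toFinset
    · simpa using h hx
    · rw [Finset.mem_union, not_or] at hx
      rw [not_mem_getD_zero c x (fun h' => hx.1 (List.mem_toFinset.2 h')),
          not_mem_getD_zero target x (fun h' => hx.2 (List.mem_toFinset.2 h'))]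
  · intro h y _; simp [h y]

theorem get?_of_contains_getD (d : PySem.Dict String Int) (x : String) (h : d.contains x = true) :
    d.get? x = some (d.getD x 0) := by
  cases hq : d.get? x with
  | none => rw [PySem.Dict.get?_eq_none_iff_contains] at hq; rw [hq] at h; cases h
  | some v => rw [PySem.Dict.getD_eq_get?_getD, hq]; rfl

theorem pyDictEq_counter_iff (target : PySem.Dict String Int) (hnd : target.keys.Nodup)
    (w : List String) :
    pyDictEq (PySem.Dict.counter w) target = true ↔
      ((∀ p ∈ target.items, 1 ≤ p.2) ∧ ∀ x, ((w.count x : Int)) = target.getD x 0) := by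
  unfold pyDictEq
  rw [Bool.and_eq_true, List.all_eq_true, List.all_eq_true]
  have hndc := PySem.Dict.nodup_keys_counter w
  constructor
  · rintro ⟨h1, h2⟩
    constructor
    · intro p hp
      have := h2 p hp
      rw [beq_iff_eq] at this
      rw [PySem.Dict.get?_eq_some_iff_mem_items _ _ _ hndc, PySem.Dict.items_counter] at this
      obtain ⟨k, hk, hkp⟩ := List.mem_map.1 this
      rw [PySem.Set.mem_ofList] at hk
      have hsnd := congrArg Prod.snd hkp
      have : 0 < w.count k := List.count_pos_iff.2 hk
      simp only at hsnd
      rw [← hsnd]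
      exact_mod_cast this
    · intro x
      by_cases hcw : x ∈ w
      · have hmem : (x, ((w.count x : Int))) ∈ (PySem.Dict.counter w).items := by
          rw [PySem.Dict.items_counter]
          exact List.mem_map.2 ⟨x, (PySem.Set.mem_ofList w x).2 hcw, rfl⟩
        have := h1 _ hmem
        rw [beq_iff_eq] at this
        rw [PySem.Dict.getD_eq_get?_getD, this]; rfl
      · have hc0 : w.count x = 0 := List.count_eq_zero.2 hcw
        by_cases hct : target.contains x
        · exfalso
          obtain ⟨v, hv⟩ : ∃ v, target.get? x = some v := by
            cases hq : target.get? x with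
            | none => rw [PySem.Dict.get?_eq_none_iff_contains] at hq; rw [hq] at hct; cases hct
            | some v => exact ⟨v, rfl⟩
          have hmem := (PySem.Dict.get?_eq_some_iff_mem_items _ _ _ hnd).1 hv
          have := h2 _ hmem
          rw [beq_iff_eq] at this
          have : (PySem.Dict.counter w).contains x = true := by
            rw [← Bool.not_eq_false, ← PySem.Dict.get?_eq_none_iff_contains, this]
            simp
          rw [PySem.Dict.contains_counter] at this
          exact hcw (by simpa using this)
        · rw [hc0, PySem.Dict.getD_of_not_contains target 0 (by simpa using hct)]
          rfl
  · rintro ⟨hpos, hcnt⟩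
    constructor
    · intro p hp
      rw [PySem.Dict.items_counter] at hp
      obtain ⟨k, hk, hkp⟩ := List.mem_map.1 hp
      rw [PySem.Set.mem_ofList] at hk
      subst hkp
      have h1 : target.getD k 0 = ((w.count k : Int)) := (hcnt k).symm
      have hck : target.contains k = true := by
        by_contra hct
        rw [PySem.Dict.getD_of_not_contains target 0 (by simpa using hct)] at h1
        have : 0 < w.count k := List.count_pos_iff.2 hk
        omega
      rw [get?_of_contains_getD target k hck, h1, beq_iff_eq]
    · intro p hp
      have hgd : target.getD p.1 0 = p.2 := PySem.Dict.getD_of_mem_items target hp hnd 0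
      have h2 : ((w.count p.1 : Int)) = p.2 := by rw [hcnt p.1, hgd]
      have hv1 : 1 ≤ p.2 := hpos p hp
      have hmemw : p.1 ∈ w := by
        rw [← List.count_pos_iff]; omega
      have hck : (PySem.Dict.counter w).contains p.1 = true := by
        rw [PySem.Dict.contains_counter]; simpa using hmemw
      rw [get?_of_contains_getD _ _ hck, PySem.Dict.getD_counter, h2, beq_iff_eq]

theorem window_map (discount : List String) :
    ∀ (len a : Nat), a + len ≤ discount.length →
      (PySem.List.pyRange (a : Int) ((a : Int) + (len : Int))).map
          (fun j => PySem.List.pyGetD discount j "")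
        = (discount.drop a).take len := by
  intro len
  induction len with
  | zero =>
    intro a h
    rw [PySem.List.pyRange_one_eq_nil (by omega)]
    simp
  | succ l ih =>
    intro a h
    rw [PySem.List.pyRange_one_cons (by push_cast; omega)]
    simp only [List.map_cons]
    have h1 : PySem.List.pyGetD discount (a : Int) "" = discount[a]'(by omega) := by
      rw [PySem.List.pyGetD_natCast]
      exact List.getD_eq_getElem discount "" (by omega)
    have h2 : ((a : Int) + 1) = ((a + 1 : Nat) : Int) := by push_cast; ring
    have h3 : ((a : Int) + ((l + 1 : Nat) : Int)) = ((a + 1 : Nat) : Int) + (l : Int) := by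
      push_cast; ring
    rw [h1, h2, h3, ih (a + 1) (by omega),
      List.drop_eq_getElem_cons (show a < discount.length by omega), List.take_succ_cons]

theorem A_window (discount : List String) (a K : Nat) (h : a + K ≤ discount.length) :
    (PySem.List.pyRange (a : Int) ((a : Int) + (K : Int))).foldl
        (fun d j =>
          let x := PySem.List.pyGetD discount j ""
          if d.contains x then d.insert x (d.getD x 0 + 1) else d.insert x 1)
        PySem.Dict.empty
      = PySem.Dict.counter ((discount.drop a).take K) := by
  have hcong : (PySem.List.pyRange (a : Int) ((a : Int) + (K : Int))).foldl
        (fun d j =>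
          let x := PySem.List.pyGetD discount j ""
          if d.contains x then d.insert x (d.getD x 0 + 1) else d.insert x 1)
        PySem.Dict.empty
      = (PySem.List.pyRange (a : Int) ((a : Int) + (K : Int))).foldl
        (fun d j =>
          let x := PySem.List.pyGetD discount j ""
          d.insert x (d.getD x 0 + 1))
        (PySem.Dict.empty : PySem.Dict String Int) := by
    apply PySem.List.foldl_congr_mem
    intro d j _
    simp only
    by_cases hc : d.contains (PySem.List.pyGetD discount j "")
    · rw [if_pos hc]
    · rw [if_neg (by simpa using hc),
        PySem.Dict.getD_of_not_contains d 0 (by simpa using hc)]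
      norm_num
  refine hcong.trans ?_
  rw [← window_map discount K a h, ← PySem.Dict.foldl_insert_getD_add_one_eq_counter,
    List.foldl_map]

theorem count_swap (x u v : String) (t : List String) :
    (t ++ [v]).count x + (if x = u then 1 else 0)
      = (u :: t).count x + (if x = v then 1 else 0) := by
  rw [List.count_append, List.count_cons, List.count_cons, List.count_nil]
  by_cases h1 : u = x <;> by_cases h2 : v = x
  · subst h1; subst h2; simp
  · subst h1; simp [h2, Ne.symm h2]
  · subst h2; simp [h1, Ne.symm h1]
  · simp [h1, h2, Ne.symm h1, Ne.symm h2]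

theorem count_slide (l : List String) (i K : Nat) (hik : i + K < l.length)
    (x : String) :
    ((l.drop (i + 1)).take K).count x + (if x = l[i]'(by omega) then 1 else 0)
      = ((l.drop i).take K).count x + (if x = l[i + K]'(by omega) then 1 else 0) := by
  cases K with
  | zero => simp
  | succ K' =>
    have hdi : l.drop i = l[i]'(by omega) :: l.drop (i + 1) := List.drop_eq_getElem_cons (by omega)
    have htake : (l.drop (i + 1)).take (K' + 1)
        = (l.drop (i + 1)).take K' ++ [l[i + (K' + 1)]'(by omega)] := by
      rw [List.take_add_one]
      congr 1
      rw [List.getElem?_drop]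
      rw [List.getElem?_eq_getElem (by omega)]
      simp only [Option.toList_some]
      congr 2
      omega
    rw [htake, hdi, List.take_succ_cons]
    exact count_swap x (l[i]'(by omega)) (l[i + (K' + 1)]'(by omega)) ((l.drop (i + 1)).take K')

theorem B_init (target : PySem.Dict String Int) (z : Int) :
    ∀ (ys : List String) (c : PySem.Dict String Int) (mm : Int),
      mm = (Mcard target c : Int) + z →
      (∀ x, (ys.foldl (fun st x => shiftB target st x 1) (c, mm)).1.getD x 0
          = c.getD x 0 + (ys.count x : Int))
      ∧ (ys.foldl (fun st x => shiftB target st x 1) (c, mm)).2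
          = (Mcard target (ys.foldl (fun st x => shiftB target st x 1) (c, mm)).1 : Int) + z := by
  intro ys
  induction ys with
  | nil => intro c mm hmm; constructor
           · intro x; simp
           · simpa using hmm
  | cons y ys ih =>
    intro c mm hmm
    rw [List.foldl_cons, shiftB_spec target c mm z y 1 hmm]
    obtain ⟨h1, h2⟩ := ih (c.insert y (c.getD y 0 + 1)) _ rfl
    refine ⟨fun x => ?_, h2⟩
    rw [h1 x, PySem.Dict.getD_insert, List.count_cons]
    by_cases hxy : y = x
    · subst hxy; simp; ring
    · simp [hxy, Ne.symm hxy]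

-- the initial mismatch value len(target) splits into nonzero-valued and zero-valued keys
theorem size_eq_Mcard_empty_add_Zcard (target : PySem.Dict String Int) (hnd : target.keys.Nodup) :
    target.size = Mcard target (PySem.Dict.empty : PySem.Dict String Int) + Zcard target := by
  unfold Mcard Zcard
  rw [PySem.Dict.keys_empty]
  simp only [List.toFinset_nil, Finset.empty_union]
  have hM : (target.keys.toFinset.filter
      (fun x => (PySem.Dict.empty : PySem.Dict String Int).getD x 0 ≠ target.getD x 0))
      = target.keys.toFinset.filter (fun x => ¬ target.getD x 0 = 0) := by
    apply Finset.filter_congr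
    intro y _
    rw [PySem.Dict.getD_empty]
    exact ⟨fun h => fun h0 => h h0.symm, fun h => fun h0 => h h0.symm⟩
  rw [hM]
  have hsum := Finset.card_filter_add_card_filter_not
      (s := target.keys.toFinset) (p := fun x => target.getD x 0 = 0)
  have hcard : target.keys.toFinset.card = target.keys.length := List.toFinset_card_of_nodup hnd
  have hsize : target.size = target.keys.length := by
    simp [PySem.Dict.size, PySem.Dict.keys]
  omega

theorem slide_getD (c : PySem.Dict String Int) (wOld wNew : List String) (a b : String)
    (hrec : ∀ x : String, ((wNew.count x : Int)) + (if x = a then 1 else 0)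
      = ((wOld.count x : Int)) + (if x = b then 1 else 0))
    (hc : ∀ x, c.getD x 0 = ((wOld.count x : Int))) :
    ∀ x, ((c.insert a (c.getD a 0 + -1)).insert b
        ((c.insert a (c.getD a 0 + -1)).getD b 0 + 1)).getD x 0 = ((wNew.count x : Int)) := by
  intro x
  simp only [PySem.Dict.getD_insert]
  by_cases hxb : x = b
  · subst hxb
    by_cases hba : x = a
    · subst hba
      have e1 := hrec x
      have e3 := hc x
      simp at e1 ⊢
      omega
    · have e1 := hrec x
      have e4 := hc x
      simp [hba] at e1 ⊢
      omega
  · by_cases hxa : x = a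
    · subst hxa
      have e1 := hrec x
      have e3 := hc x
      simp [hxb] at e1 ⊢
      omega
    · have e1 := hrec x
      have e2 := hc x
      simp [hxa, hxb] at e1 ⊢
      omega

theorem int_add_zero_iff (a b : Nat) (z : Int) (hz : 0 ≤ z) (h : a = 0 ↔ b = 0) :
    ((a : Int) + z = 0 ↔ (b : Int) + z = 0) := by
  omega

theorem B_loop (discount : List String) (target : PySem.Dict String Int) (K N : Nat) (z : Int)
    (hz : 0 ≤ z) (hm : N + K = discount.length) :
    ∀ (r i : Nat), i + r = N →
    ∀ (c : PySem.Dict String Int) (mm acc : Int),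
    (∀ x, c.getD x 0 = (((discount.drop i).take K).count x : Int)) →
    mm = (Mcard target c : Int) + z →
    ((PySem.List.pyRange ((i : Int) + 1) ((N : Int) + 1)).foldl
       (fun p idx =>
          (shiftB target (shiftB target p.1 (PySem.List.pyGetD discount (idx - 1) "") (-1))
              (PySem.List.pyGetD discount (idx + (K : Int) - 1) "") 1,
            if (shiftB target (shiftB target p.1 (PySem.List.pyGetD discount (idx - 1) "") (-1))
                (PySem.List.pyGetD discount (idx + (K : Int) - 1) "") 1).2 = 0
            then p.2 + 1 else p.2))
       ((c, mm), acc)).2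
    = acc + (List.countP
        (fun j => decide ((Mcard target (PySem.Dict.counter ((discount.drop (i + 1 + j)).take K)) : Int) + z = 0))
        (List.range r) : Int) := by
  intro r
  induction r with
  | zero =>
    intro i hi c mm acc hc hmm
    rw [PySem.List.pyRange_one_eq_nil (by omega)]
    simp
  | succ r ih =>
    intro i hi c mm acc hc hmm
    rw [PySem.List.pyRange_one_cons (by omega)]
    rw [List.foldl_cons]
    simp only
    have hget1 : PySem.List.pyGetD discount ((i : Int) + 1 - 1) "" = discount[i]'(by omega) := by
      rw [show (i : Int) + 1 - 1 = ((i : Nat) : Int) by ring, PySem.List.pyGetD_natCast]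
      exact List.getD_eq_getElem discount "" (by omega)
    have hget2 : PySem.List.pyGetD discount ((i : Int) + 1 + (K : Int) - 1) ""
        = discount[i + K]'(by omega) := by
      rw [show (i : Int) + 1 + (K : Int) - 1 = ((i + K : Nat) : Int) by push_cast; ring,
        PySem.List.pyGetD_natCast]
      exact List.getD_eq_getElem discount "" (by omega)
    rw [hget1, hget2]
    rw [shiftB_spec target c mm z _ _ hmm]
    rw [shiftB_spec target _ _ z _ _ rfl]
    -- the slide recurrence, in Int form
    have hrecI : ∀ x : String,
        ((((discount.drop (i + 1)).take K).count x : Int))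
            + (if x = discount[i]'(by omega) then 1 else 0)
          = ((((discount.drop i).take K).count x : Int))
            + (if x = discount[i + K]'(by omega) then 1 else 0) := by
      intro x
      have hN := count_slide discount i K (by omega) x
      split_ifs at hN ⊢ <;> omega
    have hcount2 := slide_getD c ((discount.drop i).take K) ((discount.drop (i + 1)).take K)
      (discount[i]'(by omega)) (discount[i + K]'(by omega)) hrecI hc
    have hcond : ((Mcard target
          ((c.insert (discount[i]'(by omega)) (c.getD (discount[i]'(by omega)) 0 + -1)).insert
            (discount[i + K]'(by omega))
            ((c.insert (discount[i]'(by omega)) (c.getD (discount[i]'(by omega)) 0 + -1)).getD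
              (discount[i + K]'(by omega)) 0 + 1)) : Int) + z = 0)
        ↔ ((Mcard target (PySem.Dict.counter ((discount.drop (i + 1)).take K)) : Int) + z = 0) := by
    
      have hiff : (Mcard target
          ((c.insert (discount[i]'(by omega)) (c.getD (discount[i]'(by omega)) 0 + -1)).insert
            (discount[i + K]'(by omega))
            ((c.insert (discount[i]'(by omega)) (c.getD (discount[i]'(by omega)) 0 + -1)).getD
              (discount[i + K]'(by omega)) 0 + 1)) = 0)
          ↔ (Mcard target (PySem.Dict.counter ((discount.drop (i + 1)).take K)) = 0) := by
        rw [Mcard_eq_zero_iff, Mcard_eq_zero_iff]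
        apply forall_congr'
        intro x
        rw [hcount2 x, PySem.Dict.getD_counter]
      exact int_add_zero_iff _ _ z hz hiff
    rw [show ((i : Int) + 1) + 1 = ((i + 1 : Nat) : Int) + 1 by push_cast; ring]
    rw [ih (i + 1) (by omega) _ _ _ hcount2 rfl]
    rw [List.range_succ_eq_map, List.countP_cons, List.countP_map]
    have hcp : List.countP
          ((fun j => decide ((Mcard target
              (PySem.Dict.counter ((discount.drop (i + 1 + j)).take K)) : Int) + z = 0)) ∘ Nat.succ)
          (List.range r)
        = List.countP
          (fun j => decide ((Mcard target
              (PySem.Dict.counter ((discount.drop (i + 1 + 1 + j)).take K)) : Int) + z = 0))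
          (List.range r) := by
      apply List.countP_congr
      intro j _
      simp only [Function.comp_apply, decide_eq_true_eq]
      rw [show i + 1 + Nat.succ j = i + 1 + 1 + j by omega]
    rw [hcp]
    by_cases hzz : (Mcard target (PySem.Dict.counter ((discount.drop (i + 1)).take K)) : Int) + z = 0
    · rw [if_pos (hcond.2 hzz), if_pos (by simpa using hzz)]
      push_cast
      ring
    · rw [if_neg (fun h => hzz (hcond.1 h)), if_neg (by simpa using hzz)]
      push_cast
      ring

-- A's answer, for a window size that fits, is the number of matching windows.
theorem A_eval (want : List String) (number : List Int) (discount : List String)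
    (K N : Nat) (hk : number.sum = (K : Int)) (hm : N + K = discount.length) :
    solution want number discount
      = (List.countP (fun j => pyDictEq (PySem.Dict.counter ((discount.drop j).take K))
          (PySem.Dict.ofList (want.zip number))) (List.range (N + 1)) : Int) := by
  unfold solution
  simp only [hk]
  rw [show PySem.List.len discount - (K : Int) + 1 = ((N + 1 : Nat) : Int) by
    rw [PySem.List.len_eq]; push_cast; omega]
  rw [PySem.List.pyRange_zero_natCast, List.foldl_map]
  rw [PySem.List.foldl_congr_mem (List.range (N + 1))
    _ (fun answer j => if pyDictEq (PySem.Dict.counter ((discount.drop j).take K))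
        (PySem.Dict.ofList (want.zip number)) then answer + 1 else answer) 0
    (by
      intro acc j hj
      rw [List.mem_range] at hj
      simp only
      rw [A_window discount j K (by omega)])]
  rw [PySem.List.foldl_count_if]
  ring

-- a window's mismatch count is zero exactly when A's dict comparison succeeds
theorem mm_zero_iff_pyDictEq (target : PySem.Dict String Int) (hnd : target.keys.Nodup)
    (w : List String) :
    ((Mcard target (PySem.Dict.counter w) : Int) + (Zcard target : Int) = 0)
      ↔ pyDictEq (PySem.Dict.counter w) target = true := by
  rw [pyDictEq_counter_iff target hnd]
  constructor
  · intro h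
    have hM : Mcard target (PySem.Dict.counter w) = 0 := by omega
    have hZ : Zcard target = 0 := by omega
    have hcnt : ∀ x, ((w.count x : Int)) = target.getD x 0 := by
      intro x
      have := (Mcard_eq_zero_iff _ _).1 hM x
      rw [PySem.Dict.getD_counter] at this
      exact this
    refine ⟨fun p hp => ?_, hcnt⟩
    have hgd : target.getD p.1 0 = p.2 := PySem.Dict.getD_of_mem_items target hp hnd 0
    have hk1 : p.1 ∈ target.keys := by
      unfold PySem.Dict.keys
      exact List.mem_map.2 ⟨p, hp, rfl⟩
    have hne : ¬ target.getD p.1 0 = 0 := by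
      intro h0
      have : p.1 ∈ target.keys.toFinset.filter (fun x => target.getD x 0 = 0) :=
        Finset.mem_filter.2 ⟨List.mem_toFinset.2 hk1, h0⟩
      unfold Zcard at hZ
      rw [Finset.card_eq_zero] at hZ
      rw [hZ] at this
      exact absurd this (Finset.notMem_empty _)
    have hge : (0 : Int) ≤ p.2 := by
      rw [← hgd, ← hcnt p.1]
      exact Int.natCast_nonneg _
    omega
  · rintro ⟨hpos, hcnt⟩
    have hM : Mcard target (PySem.Dict.counter w) = 0 := by
      rw [Mcard_eq_zero_iff]
      intro x
      rw [PySem.Dict.getD_counter]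
      exact hcnt x
    have hZ : Zcard target = 0 := by
      unfold Zcard
      rw [Finset.card_eq_zero, Finset.filter_eq_empty_iff]
      intro x hx
      rw [List.mem_toFinset] at hx
      obtain ⟨p, hp, hp1⟩ := List.mem_map.1 hx
      subst hp1
      have hgd : target.getD p.1 0 = p.2 := PySem.Dict.getD_of_mem_items target hp hnd 0
      have := hpos p hp
      omega
    omega

theorem case_big (want : List String) (number : List Int) (discount : List String)
    (h1 : PySem.List.len discount - number.sum < 0) :
    solution want number discount = solution_alt want number discount := by
  unfold solution solution_alt
  simp only
  rw [if_pos h1]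
  rw [PySem.List.pyRange_one_eq_nil (by omega)]
  rfl

theorem case_main (want : List String) (number : List Int) (discount : List String)
    (h0 : 0 ≤ number.sum) (h1 : ¬ PySem.List.len discount - number.sum < 0) :
    solution want number discount = solution_alt want number discount := by
  have hnd := PySem.Dict.nodup_keys_ofList (want.zip number)
  have hlenI : number.sum ≤ (discount.length : Int) := by
    rw [PySem.List.len_eq] at h1; omega
  set target := PySem.Dict.ofList (want.zip number) with htarget
  set K := number.sum.toNat with hKdef
  set N := discount.length - K with hNdef
  have hk : number.sum = (K : Int) := by omega
  have hm : N + K = discount.length := by omega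
  set z : Int := (Zcard target : Int) with hzdef
  have hz : 0 ≤ z := by rw [hzdef]; exact Int.natCast_nonneg _
  -- the common spec: which windows match
  have hA := A_eval want number discount K N hk hm
  have hpEq : ∀ j : Nat, (pyDictEq (PySem.Dict.counter ((discount.drop j).take K)) target
      = decide ((Mcard target (PySem.Dict.counter ((discount.drop j).take K)) : Int) + z = 0)) := by
    intro j
    rcases Bool.eq_false_or_eq_true
        (pyDictEq (PySem.Dict.counter ((discount.drop j).take K)) target) with hb | hb
    · rw [hb]
      symm
      rw [decide_eq_true_iff]
      exact (mm_zero_iff_pyDictEq target hnd _).2 hb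
    · rw [hb]
      symm
      rw [decide_eq_false_iff_not]
      intro hmz
      have := (mm_zero_iff_pyDictEq target hnd _).1 hmz
      rw [this] at hb
      cases hb
  -- evaluate B
  unfold solution_alt
  simp only [← htarget]
  rw [if_neg h1]
  simp only [hk]
  -- first loop = B_init over the first window
  have hfm := List.foldl_map (f := fun j : Int => PySem.List.pyGetD discount j "")
    (g := fun (st : PySem.Dict String Int × Int) (x : String) => shiftB target st x 1)
    (l := PySem.List.pyRange ((0 : Nat) : Int) (((0 : Nat) : Int) + (K : Int)))
    (init := ((PySem.Dict.empty : PySem.Dict String Int), (target.size : Int)))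
  rw [window_map discount K 0 (by omega)] at hfm
  rw [show (PySem.List.pyRange 0 ((K : Int)))
      = PySem.List.pyRange ((0 : Nat) : Int) (((0 : Nat) : Int) + (K : Int)) by norm_num]
  rw [← hfm]
  have hmm_init : (target.size : Int)
      = (Mcard target (PySem.Dict.empty : PySem.Dict String Int) : Int) + z := by
    rw [hzdef, ← Nat.cast_add, ← size_eq_Mcard_empty_add_Zcard target hnd]
  have hinit := B_init target z ((discount.drop 0).take K) PySem.Dict.empty (target.size : Int)
    hmm_init
  set st0 := (((discount.drop 0).take K).foldl
    (fun (st : PySem.Dict String Int × Int) (x : String) => shiftB target st x 1)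
    ((PySem.Dict.empty : PySem.Dict String Int), (target.size : Int))) with hst0
  obtain ⟨hc0, hmm0⟩ := hinit
  have hc0' : ∀ x, st0.1.getD x 0 = (((discount.drop 0).take K).count x : Int) := by
    intro x
    rw [hc0 x, PySem.Dict.getD_empty]
    ring
  -- main loop = B_loop from window 0
  rw [show PySem.List.len discount - (K : Int) + 1 = ((N : Nat) : Int) + 1 by
    rw [PySem.List.len_eq]; omega]
  rw [show PySem.List.pyRange (1 : Int) ((N : Int) + 1)
      = PySem.List.pyRange (((0 : Nat) : Int) + 1) (((N : Nat) : Int) + 1) by norm_num]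
  rw [show st0 = (st0.1, st0.2) from rfl]
  rw [B_loop discount target K N z hz hm N 0 (by omega) st0.1 st0.2 _ hc0' hmm0]
  -- combine with A's count
  rw [hA]
  rw [show N + 1 = N.succ from rfl, List.range_succ_eq_map, List.countP_cons, List.countP_map]
  have hcp : List.countP ((fun j => pyDictEq
        (PySem.Dict.counter ((discount.drop j).take K)) target) ∘ Nat.succ) (List.range N)
      = List.countP (fun j => decide ((Mcard target
          (PySem.Dict.counter ((discount.drop (0 + 1 + j)).take K)) : Int) + z = 0)) (List.range N) := by
    apply List.countP_congr
    intro j _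
    simp only [Function.comp_apply, hpEq (Nat.succ j)]
    rw [show Nat.succ j = 0 + 1 + j by omega]
  rw [hcp]
  have hz0 : (st0.2 = 0) ↔ ((fun j : Nat => pyDictEq
      (PySem.Dict.counter ((discount.drop j).take K)) target) 0 = true) := by
    have hiff : Mcard target st0.1 = 0
        ↔ Mcard target (PySem.Dict.counter ((discount.drop 0).take K)) = 0 := by
      rw [Mcard_eq_zero_iff, Mcard_eq_zero_iff]
      apply forall_congr'
      intro x
      rw [hc0' x, PySem.Dict.getD_counter]
    rw [hmm0]
    simp only [hpEq 0, decide_eq_true_iff]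
    exact int_add_zero_iff _ _ z hz hiff
  by_cases hzz : st0.2 = 0
  · rw [if_pos hzz, if_pos (hz0.1 hzz)]
    push_cast
    ring
  · rw [if_neg hzz, if_neg (fun h => hzz (hz0.2 h))]
    push_cast
    ring

-- ===== VERDICT (by name: the statement is the Claim_ definition above) =====
theorem solution_spec : Claim_equal_solution := by
  unfold Claim_equal_solution Spec_solution
  intro want number discount _ hpre
  by_cases h1 : PySem.List.len discount - number.sum < 0
  · exact case_big want number discount h1
  · exact case_main want number discount hpre h1
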